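-- pv_equiv track=rewrite | github.com/cyshen11/finance-chatbot | components/graph.py | extract_sql_headers
-- ===== SOURCE A (Python) =====
-- def extract_sql_headers(sql_query: str) -> list:
--   """
--   Extract column headers from a SQL SELECT query, handling aliases and functions.
--
--   Args:
--       sql_query (str): The SQL query to parse
--
--   Returns:
--       list: List of column headers
--   """
--   # Get the SELECT clause (everything between SELECT and FROM)
--   try:
--       select_clause = sql_query.upper().split('FROM')[0].replace('SELECT', '').strip()
--   except IndexError:
--       return []
--
--   # Split the columns by comma, but handle nested functions
--   headers = []
--   current_header = ''
--   paren_count = 0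
--
--   for char in select_clause:
--       if char == '(' and paren_count >= 0:
--           paren_count += 1
--           current_header += char
--       elif char == ')' and paren_count > 0:
--           paren_count -= 1
--           current_header += char
--       elif char == ',' and paren_count == 0:
--           headers.append(current_header.strip())
--           current_header = ''
--       else:
--           current_header += char
--
--   # Add the last header
--   if current_header:
--       headers.append(current_header.strip())
--
--   # Process each header to handle aliases
--   processed_headers = []
--   for header in headers:
--       # Check for AS keyword
--       if ' AS ' in header.upper():
--           # Take the alias after AS
--           alias = header.split(' AS ')[-1].strip()
--           processed_headers.append(alias.strip('`" '))
--       else: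
--           # If no AS, take the original column name
--           processed_headers.append(header.strip('`" '))
--
--   return processed_headers
-- ===== SOURCE B (Python) =====
-- def extract_sql_headers(sql_query: str) -> list:
--     """Slice-based recursive splitter: instead of scanning char-by-char with an
--     accumulator state machine and a second alias pass, find the index of the
--     first top-level comma, slice the clause there, recurse on the remainder,
--     and resolve each slice's alias on the way out."""
--     clause = sql_query.upper().split('FROM')[0].replace('SELECT', '').strip()
--
--     def cut(s):
--         """Index of the first comma outside parentheses, or None."""
--         depth = 0
--         for i, ch in enumerate(s):
--             if ch == '(':
--                 depth += 1
--             elif ch == ')' and depth > 0: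
--                 depth -= 1
--             elif ch == ',' and depth == 0:
--                 return i
--         return None
--
--     def split_top(s):
--         i = cut(s)
--         if i is None:
--             return [s] if s else []
--         return [s[:i]] + split_top(s[i+1:])
--
--     def resolve(raw):
--         h = raw.strip()
--         if ' AS ' in h.upper():
--             h = h.split(' AS ')[-1].strip()
--         return h.strip('`" ')
--
--     return [resolve(seg) for seg in split_top(clause)]
-- ===== Notes on version B (the rewrite author's own statement) =====
-- stated objective: alternative
-- what changed: B replaces A's character-accumulator state machine (build current_header char by char, then a second alias-resolution loop) with a slice-based recursive splitter: an index scan finds the first top-level comma, the clause is sliced there and the recursion continues on the remainder, resolving each slice's alias on the way out; no accumulator string and no second pass over collected headers.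
import Mathlib
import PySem

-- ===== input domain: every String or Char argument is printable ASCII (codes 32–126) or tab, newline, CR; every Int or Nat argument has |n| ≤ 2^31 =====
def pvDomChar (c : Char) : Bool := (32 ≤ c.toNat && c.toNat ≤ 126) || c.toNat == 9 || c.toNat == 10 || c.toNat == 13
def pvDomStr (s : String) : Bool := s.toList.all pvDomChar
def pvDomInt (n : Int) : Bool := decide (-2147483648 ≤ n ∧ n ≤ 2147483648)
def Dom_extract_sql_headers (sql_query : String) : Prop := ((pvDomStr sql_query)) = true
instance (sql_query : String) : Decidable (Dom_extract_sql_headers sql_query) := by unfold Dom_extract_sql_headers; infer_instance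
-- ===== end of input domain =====

-- B replaces A's char-accumulator state machine + second alias pass with a slice-based
-- recursive splitter (find first top-level comma, slice, recurse); objective: alternative decomposition.


-- ===== PORT A =====
-- select_clause = sql_query.upper().split('FROM')[0].replace('SELECT', '').strip()
-- (the try/except IndexError is dead code: split always yields a non-empty list)
def pvSelectClause (sql_query : String) : List Char :=
  PySem.Chars.strip (PySem.Chars.replace
    (((PySem.Chars.split? (PySem.Chars.upper sql_query.toList) "FROM".toList).getD []).headD [])
    "SELECT".toList "".toList)

-- body of A's character loop; state = (headers, current_header, paren_count)
def pvStepA (st : List (List Char) × List Char × Int) (c : Char) :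
    List (List Char) × List Char × Int :=
  let (headers, current, paren) := st
  if c = '(' ∧ paren ≥ 0 then (headers, current ++ [c], paren + 1)
  else if c = ')' ∧ paren > 0 then (headers, current ++ [c], paren - 1)
  else if c = ',' ∧ paren = 0 then (headers ++ [PySem.Chars.strip current], [], paren)
  else (headers, current ++ [c], paren)

-- body of A's second loop: alias resolution of one (already collected) header
def pvProcA (header : List Char) : List Char :=
  if PySem.Chars.isIn " AS ".toList (PySem.Chars.upper header) then
    PySem.Chars.stripChars
      (PySem.Chars.strip (((PySem.Chars.split? header " AS ".toList).getD []).getLastD []))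
      "`\" ".toList
  else
    PySem.Chars.stripChars header "`\" ".toList

def extract_sql_headers (sql_query : String) : List String :=
  let st := (pvSelectClause sql_query).foldl pvStepA ([], [], 0)
  let headers := if st.2.1 ≠ [] then st.1 ++ [PySem.Chars.strip st.2.1] else st.1
  (headers.map pvProcA).map (fun h => String.ofList h)

-- ===== PORT B =====
-- Source B's cut(s): index of the first comma outside parentheses, or None
-- (loop over enumerate with a running depth → recursion with a depth accumulator)
def pvCut : List Char → Int → Option Nat
  | [], _ => none
  | c :: cs, d =>
    if c = '(' then (pvCut cs (d + 1)).map Nat.succ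
    else if c = ')' ∧ d > 0 then (pvCut cs (d - 1)).map Nat.succ
    else if c = ',' ∧ d = 0 then some 0
    else (pvCut cs d).map Nat.succ

lemma pvCut_lt (s : List Char) (d : Int) (i : Nat) (h : pvCut s d = some i) : i < s.length := by
  induction s generalizing d i with
  | nil => simp [pvCut] at h
  | cons c cs ih =>
    simp only [pvCut] at h
    split_ifs at h <;>
      first
        | (simp only [Option.map_eq_some_iff] at h
           obtain ⟨j, hj, rfl⟩ := h
           have := ih _ _ hj
           simp; omega)
        | (simp_all; omega)

-- Source B's split_top(s)
def pvSplitTop (s : List Char) : List (List Char) :=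
  match h : pvCut s 0 with
  | none => if s = [] then [] else [s]
  | some i => s.take i :: pvSplitTop (s.drop (i + 1))
termination_by s.length
decreasing_by
  have := pvCut_lt s 0 i h
  simp [List.length_drop]; omega

-- Source B's resolve(raw): strip, take the segment after the last ' AS ' (if any), strip quotes
def pvResolve (raw : List Char) : List Char :=
  let h := PySem.Chars.strip raw
  if PySem.Chars.isIn " AS ".toList (PySem.Chars.upper h) then
    PySem.Chars.stripChars
      (PySem.Chars.strip (((PySem.Chars.split? h " AS ".toList).getD []).getLastD []))
      "`\" ".toList
  else
    PySem.Chars.stripChars h "`\" ".toList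

def extract_sql_headers_alt (sql_query : String) : List String :=
  let clause := PySem.Chars.strip (PySem.Chars.replace
    (((PySem.Chars.split? (PySem.Chars.upper sql_query.toList) "FROM".toList).getD []).headD [])
    "SELECT".toList "".toList)
  (pvSplitTop clause).map (fun seg => String.ofList (pvResolve seg))

-- ===== PRECONDITION & SPEC =====
def Spec_extract_sql_headers (sql_query : String) (out : List String) : Prop := out = extract_sql_headers_alt sql_query
instance (sql_query : String) (out : List String) : Decidable (Spec_extract_sql_headers sql_query out) := by unfold Spec_extract_sql_headers; infer_instance

-- ===== CLAIM (what is proved, stated in full; the proofs are below) =====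
def Claim_equal_extract_sql_headers : Prop := ∀ (sql_query : String), Dom_extract_sql_headers sql_query → Spec_extract_sql_headers sql_query (extract_sql_headers sql_query)

-- ===== LEMMAS AND PROOFS =====

lemma pvResolve_eq (raw : List Char) : pvResolve raw = pvProcA (PySem.Chars.strip raw) := rfl

-- A's loop when no top-level comma remains: headers untouched, the rest accumulates
lemma pvFold_none (cs : List Char) (hd : List (List Char)) (cur : List Char) (d : Int)
    (hd0 : 0 ≤ d) (h : pvCut cs d = none) :
    (cs.foldl pvStepA (hd, cur, d)).1 = hd ∧
    (cs.foldl pvStepA (hd, cur, d)).2.1 = cur ++ cs := by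
  induction cs generalizing hd cur d with
  | nil => simp
  | cons c cs ih =>
    simp only [pvCut] at h
    simp only [List.foldl_cons, pvStepA]
    by_cases h1 : c = '('
    · rw [if_pos h1] at h
      rw [if_pos ⟨h1, hd0⟩]
      simp only [Option.map_eq_none_iff] at h
      simpa [List.append_assoc] using ih hd (cur ++ [c]) (d + 1) (by omega) h
    · by_cases h2 : c = ')' ∧ d > 0
      · rw [if_neg h1, if_pos h2] at h
        rw [if_neg (by tauto), if_pos h2]
        simp only [Option.map_eq_none_iff] at h
        simpa [List.append_assoc] using ih hd (cur ++ [c]) (d - 1) (by omega) h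
      · by_cases h3 : c = ',' ∧ d = 0
        · rw [if_neg h1, if_neg h2, if_pos h3] at h
          exact absurd h (by simp)
        · rw [if_neg h1, if_neg h2, if_neg h3] at h
          rw [if_neg (by tauto), if_neg h2, if_neg h3]
          simp only [Option.map_eq_none_iff] at h
          simpa [List.append_assoc] using ih hd (cur ++ [c]) d hd0 h

-- A's loop up to the first top-level comma = flush the slice before it, reset, continue
lemma pvFold_some (cs : List Char) (hd : List (List Char)) (cur : List Char) (d : Int)
    (i : Nat) (hd0 : 0 ≤ d) (h : pvCut cs d = some i) :
    cs.foldl pvStepA (hd, cur, d) =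
      (cs.drop (i + 1)).foldl pvStepA
        (hd ++ [PySem.Chars.strip (cur ++ cs.take i)], [], 0) := by
  induction cs generalizing hd cur d i with
  | nil => simp [pvCut] at h
  | cons c cs ih =>
    simp only [pvCut] at h
    simp only [List.foldl_cons, pvStepA]
    by_cases h1 : c = '('
    · rw [if_pos h1] at h
      rw [if_pos ⟨h1, hd0⟩]
      simp only [Option.map_eq_some_iff] at h
      obtain ⟨j, hj, rfl⟩ := h
      have := ih hd (cur ++ [c]) (d + 1) j (by omega) hj
      simpa [List.append_assoc] using this
    · by_cases h2 : c = ')' ∧ d > 0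
      · rw [if_neg h1, if_pos h2] at h
        rw [if_neg (by tauto), if_pos h2]
        simp only [Option.map_eq_some_iff] at h
        obtain ⟨j, hj, rfl⟩ := h
        have := ih hd (cur ++ [c]) (d - 1) j (by omega) hj
        simpa [List.append_assoc] using this
      · by_cases h3 : c = ',' ∧ d = 0
        · rw [if_neg h1, if_neg h2, if_pos h3] at h
          obtain rfl : i = 0 := by simpa using h.symm
          rw [if_neg (by tauto), if_neg h2, if_pos h3]
          rw [h3.2]
          simp
        · rw [if_neg h1, if_neg h2, if_neg h3] at h
          rw [if_neg (by tauto), if_neg h2, if_neg h3]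
          simp only [Option.map_eq_some_iff] at h
          obtain ⟨j, hj, rfl⟩ := h
          have := ih hd (cur ++ [c]) d j hd0 hj
          simpa [List.append_assoc] using this

lemma pvSplitTop_none (s : List Char) (h : pvCut s 0 = none) :
    pvSplitTop s = if s = [] then [] else [s] := by
  rw [pvSplitTop]; split <;> simp_all

lemma pvSplitTop_some (s : List Char) (i : Nat) (h : pvCut s 0 = some i) :
    pvSplitTop s = s.take i :: pvSplitTop (s.drop (i + 1)) := by
  rw [pvSplitTop]; split <;> simp_all

-- main correspondence: A's collected-and-flushed headers = B's top-level slices, stripped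
lemma pvHeaders_eq (n : Nat) : ∀ (cs : List Char), cs.length ≤ n → ∀ (hd : List (List Char)),
    (if (cs.foldl pvStepA (hd, [], (0:Int))).2.1 ≠ [] then
        (cs.foldl pvStepA (hd, [], (0:Int))).1 ++
          [PySem.Chars.strip (cs.foldl pvStepA (hd, [], (0:Int))).2.1]
      else (cs.foldl pvStepA (hd, [], (0:Int))).1)
    = hd ++ (pvSplitTop cs).map PySem.Chars.strip := by
  induction n with
  | zero =>
    intro cs hcs hd
    have : cs = [] := List.length_eq_zero_iff.mp (Nat.le_zero.mp hcs)
    subst this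
    simp [pvSplitTop_none [] rfl]
  | succ n ih =>
    intro cs hcs hd
    cases h : pvCut cs 0 with
    | none =>
      obtain ⟨e1, e2⟩ := pvFold_none cs hd [] 0 le_rfl h
      rw [pvSplitTop_none cs h]
      by_cases hnil : cs = []
      · simp [hnil]
      · simp [hnil, e1, e2]
    | some i =>
      have hi := pvCut_lt cs 0 i h
      rw [pvFold_some cs hd [] 0 i le_rfl h]
      have hlen : (cs.drop (i + 1)).length ≤ n := by
        simp [List.length_drop]; omega
      rw [ih (cs.drop (i + 1)) hlen (hd ++ [PySem.Chars.strip ([] ++ cs.take i)])]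
      rw [pvSplitTop_some cs i h]
      simp [List.append_assoc]

-- ===== VERDICT (by name: the statement is the Claim_ definition above) =====
theorem extract_sql_headers_spec : Claim_equal_extract_sql_headers := by
  intro s _
  simp only [Spec_extract_sql_headers, extract_sql_headers, extract_sql_headers_alt]
  rw [show (PySem.Chars.strip (PySem.Chars.replace
    (((PySem.Chars.split? (PySem.Chars.upper s.toList) "FROM".toList).getD []).headD [])
    "SELECT".toList "".toList)) = pvSelectClause s from rfl]
  rw [pvHeaders_eq (pvSelectClause s).length (pvSelectClause s) le_rfl []]
  simp [List.map_map, Function.comp, pvResolve_eq]
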